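-- pv_equiv track=rewrite | github.com/DancingOnAir/LeetcodePythonSolution | DP/LIS/1964_find_the_longest_valid_obstacle_course_at_each_position.py | longestObstacleCourseAtEachPosition1
-- ===== SOURCE A (Python) =====
-- from typing import List
-- from functools import lru_cache
--
-- def longestObstacleCourseAtEachPosition1(obstacles: List[int]) -> List[int]:
--     n = len(obstacles)
--
--     @lru_cache(None)
--     def dfs(i):
--         sz = 0
--
--         for j in range(i):
--             if obstacles[j] <= obstacles[i]:
--                 sz = max(sz, dfs(j))
--         return sz + 1
--
--     return [dfs(i) for i in range(n)]
-- ===== SOURCE B (Python) =====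
-- from typing import List
--
--
-- def longestObstacleCourseAtEachPosition1(obstacles: List[int]) -> List[int]:
--     # Patience sorting: tails[k] = smallest last element of a non-decreasing
--     # subsequence of length k+1 seen so far; binary search places each element.
--     tails = []
--     ans = []
--     for x in obstacles:
--         lo, hi = 0, len(tails)
--         while lo < hi:
--             mid = (lo + hi) // 2
--             if tails[mid] <= x:
--                 lo = mid + 1
--             else:
--                 hi = mid
--         ans.append(lo + 1)
--         if lo == len(tails):
--             tails.append(x)
--         else:
--             tails[lo] = x
--     return ans
-- ===== Notes on version B (the rewrite author's own statement) =====
-- stated objective: faster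
-- what changed: Replaces the memoized quadratic recursion (for each index, scan all earlier indices for the best extendable chain) by patience sorting: a sorted tails array of minimal chain ends, with a hand-written binary search placing each element.
import Mathlib
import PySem

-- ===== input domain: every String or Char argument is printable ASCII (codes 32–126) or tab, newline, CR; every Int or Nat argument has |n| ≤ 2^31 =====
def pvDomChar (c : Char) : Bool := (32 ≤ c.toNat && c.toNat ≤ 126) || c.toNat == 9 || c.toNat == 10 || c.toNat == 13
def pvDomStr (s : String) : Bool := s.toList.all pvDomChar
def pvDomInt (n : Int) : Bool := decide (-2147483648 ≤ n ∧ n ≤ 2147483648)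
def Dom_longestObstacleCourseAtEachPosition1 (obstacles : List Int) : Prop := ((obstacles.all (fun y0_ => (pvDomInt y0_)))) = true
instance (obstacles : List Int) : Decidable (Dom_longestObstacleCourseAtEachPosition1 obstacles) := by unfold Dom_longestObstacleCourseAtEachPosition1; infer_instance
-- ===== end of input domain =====

-- B replaces A's memoized O(n^2) recursion by patience sorting (sorted tails array +
-- binary search), an asymptotically faster algorithm for the same exact output.

-- ===== PORT A =====
-- obstacles[j] : every index A uses satisfies 0 ≤ j < len(obstacles), where Python
-- indexing is exactly List.getD.
def pvAGet (a : List Int) (i : Nat) : Int := a.getD i 0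

-- dfs from A: `for j in range(i): if obstacles[j] <= obstacles[i]: sz = max(sz, dfs(j))`,
-- then `return sz + 1`.  (lru_cache is memoization only, it does not change the value.)
def pvDfsA (a : List Int) (i : Nat) : Int :=
  ((List.range i).attach.foldl
    (fun sz j => if pvAGet a j.1 ≤ pvAGet a i then max sz (pvDfsA a j.1) else sz) 0) + 1
termination_by i
decreasing_by exact List.mem_range.mp j.2

-- `[dfs(i) for i in range(n)]`
def longestObstacleCourseAtEachPosition1 (obstacles : List Int) : List Int :=
  (List.range obstacles.length).map (fun i => pvDfsA obstacles i)

-- ===== PORT B =====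
-- the hand-written binary search of Source B: `while lo < hi: mid = (lo+hi)//2; ...`;
-- tails[mid] always has 0 ≤ mid < len(tails), where Python indexing is List.getD.
def pvBisect (t : List Int) (x : Int) (lo hi : Nat) : Nat :=
  if h : lo < hi then
    if t.getD ((lo + hi) / 2) 0 ≤ x then pvBisect t x ((lo + hi) / 2 + 1) hi
    else pvBisect t x lo ((lo + hi) / 2)
  else lo
termination_by hi - lo
decreasing_by all_goals omega

-- one iteration of Source B's `for x in obstacles` loop over the state (tails, ans)
def pvStep (st : List Int × List Int) (x : Int) : List Int × List Int :=
  let pos := pvBisect st.1 x 0 st.1.length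
  (if pos = st.1.length then st.1 ++ [x] else st.1.set pos x,
   st.2 ++ [(pos : Int) + 1])

def longestObstacleCourseAtEachPosition1_alt (obstacles : List Int) : List Int :=
  (obstacles.foldl pvStep ([], [])).2

-- ===== PRECONDITION & SPEC =====
def Spec_longestObstacleCourseAtEachPosition1 (obstacles : List Int) (out : List Int) : Prop := out = longestObstacleCourseAtEachPosition1_alt obstacles
instance (obstacles : List Int) (out : List Int) : Decidable (Spec_longestObstacleCourseAtEachPosition1 obstacles out) := by unfold Spec_longestObstacleCourseAtEachPosition1; infer_instance

-- ===== CLAIM (what is proved, stated in full; the proofs are below) =====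
def Claim_equal_longestObstacleCourseAtEachPosition1 : Prop := ∀ (obstacles : List Int), Dom_longestObstacleCourseAtEachPosition1 obstacles → Spec_longestObstacleCourseAtEachPosition1 obstacles (longestObstacleCourseAtEachPosition1 obstacles)

-- ===== LEMMAS AND PROOFS =====

-- unfold A's dfs without the `attach`
lemma pvDfsA_eq (a : List Int) (i : Nat) :
    pvDfsA a i = ((List.range i).foldl
      (fun sz j => if pvAGet a j ≤ pvAGet a i then max sz (pvDfsA a j) else sz) 0) + 1 := by
  rw [pvDfsA]
  exact congrArg (· + 1) (List.foldl_attach (l := List.range i)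
    (f := fun sz j => if pvAGet a j ≤ pvAGet a i then max sz (pvDfsA a j) else sz) (b := 0))

-- generic facts about the fold `sz ← if P j then max sz (g j) else sz`
lemma pv_foldl_max_ge_init (l : List Nat) (P : Nat → Prop) [DecidablePred P]
    (g : Nat → Int) (init : Int) :
    init ≤ l.foldl (fun sz j => if P j then max sz (g j) else sz) init := by
  induction l generalizing init with
  | nil => simp
  | cons hd tl ih =>
    refine le_trans ?_ (ih (if P hd then max init (g hd) else init))
    split <;> simp

lemma pv_foldl_max_ge_mem (l : List Nat) (P : Nat → Prop) [DecidablePred P]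
    (g : Nat → Int) (init : Int) (j : Nat) (hj : j ∈ l) (hP : P j) :
    g j ≤ l.foldl (fun sz j => if P j then max sz (g j) else sz) init := by
  induction l generalizing init with
  | nil => cases hj
  | cons hd tl ih =>
    rcases List.mem_cons.mp hj with h | h
    · subst h
      refine le_trans ?_ (pv_foldl_max_ge_init tl P g _)
      simp [hP]
    · exact ih _ h

lemma pv_foldl_max_le (l : List Nat) (P : Nat → Prop) [DecidablePred P]
    (g : Nat → Int) (init c : Int) (h0 : init ≤ c) (h : ∀ j ∈ l, P j → g j ≤ c) :
    l.foldl (fun sz j => if P j then max sz (g j) else sz) init ≤ c := by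
  induction l generalizing init with
  | nil => simpa using h0
  | cons hd tl ih =>
    refine ih _ ?_ (fun j hj hPj => h j (List.mem_cons_of_mem _ hj) hPj)
    show (if P hd then max init (g hd) else init) ≤ c
    split
    · exact max_le h0 (h hd List.mem_cons_self ‹P hd›)
    · exact h0

-- t is non-decreasing, phrased over getD
def pvMono (t : List Int) : Prop :=
  ∀ k1 k2 : Nat, k1 ≤ k2 → k2 < t.length → t.getD k1 0 ≤ t.getD k2 0

-- invariant tying B's tails array to A's dfs values on the processed prefix
def pvInv (a : List Int) (i : Nat) (t : List Int) : Prop :=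
  pvMono t ∧
  (∀ j, j < i → ∀ k : Nat, (k : Int) < pvDfsA a j →
    k < t.length ∧ t.getD k 0 ≤ pvAGet a j) ∧
  (∀ k : Nat, k < t.length →
    ∃ j, j < i ∧ pvDfsA a j = (k : Int) + 1 ∧ pvAGet a j = t.getD k 0)

lemma pvBisect_spec_aux (n : Nat) : ∀ (t : List Int) (x : Int) (lo hi : Nat),
    hi - lo ≤ n → pvMono t → hi ≤ t.length → lo ≤ hi →
    (∀ k, k < lo → t.getD k 0 ≤ x) →
    (∀ k, hi ≤ k → k < t.length → ¬ t.getD k 0 ≤ x) →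
    pvBisect t x lo hi ≤ t.length ∧
    (∀ k, k < pvBisect t x lo hi → t.getD k 0 ≤ x) ∧
    (pvBisect t x lo hi < t.length → ¬ t.getD (pvBisect t x lo hi) 0 ≤ x) := by
  induction n with
  | zero =>
    intro t x lo hi hn hm hhi hlh h1 h2
    have hlo : ¬ lo < hi := by omega
    rw [pvBisect, dif_neg hlo]
    exact ⟨by omega, h1, fun hl => h2 lo (by omega) hl⟩
  | succ n ih =>
    intro t x lo hi hn hm hhi hlh h1 h2
    by_cases hlo : lo < hi
    · rw [pvBisect, dif_pos hlo]
      have hmidlt : (lo + hi) / 2 < hi := by omega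
      have hmidge : lo ≤ (lo + hi) / 2 := by omega
      by_cases hmid : t.getD ((lo + hi) / 2) 0 ≤ x
      · rw [if_pos hmid]
        refine ih t x ((lo + hi) / 2 + 1) hi (by omega) hm hhi (by omega) ?_ h2
        intro k hk
        exact le_trans (hm k ((lo + hi) / 2) (by omega) (by omega)) hmid
      · rw [if_neg hmid]
        refine ih t x lo ((lo + hi) / 2) (by omega) hm (by omega) (by omega) h1 ?_
        intro k hk hklen hkx
        exact hmid (le_trans (hm ((lo + hi) / 2) k hk hklen) hkx)
    · rw [pvBisect, dif_neg hlo]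
      exact ⟨by omega, h1, fun hl => h2 lo (by omega) hl⟩

lemma pvBisect_spec (t : List Int) (x : Int) (hm : pvMono t) :
    pvBisect t x 0 t.length ≤ t.length ∧
    (∀ k, k < pvBisect t x 0 t.length → t.getD k 0 ≤ x) ∧
    (pvBisect t x 0 t.length < t.length → ¬ t.getD (pvBisect t x 0 t.length) 0 ≤ x) :=
  pvBisect_spec_aux t.length t x 0 t.length (by omega) hm le_rfl (by omega)
    (by omega) (by omega)

lemma pv_main (a : List Int) (i : Nat) (t : List Int) (hinv : pvInv a i t) :
    pvDfsA a i = (pvBisect t (pvAGet a i) 0 t.length : Int) + 1 ∧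
    pvInv a (i + 1)
      (if pvBisect t (pvAGet a i) 0 t.length = t.length
       then t ++ [pvAGet a i]
       else t.set (pvBisect t (pvAGet a i) 0 t.length) (pvAGet a i)) := by
  obtain ⟨hm, hmin, hach⟩ := hinv
  set pos := pvBisect t (pvAGet a i) 0 t.length with hpos
  obtain ⟨hp_le, hp_lo, hp_hi⟩ := pvBisect_spec t (pvAGet a i) hm
  have hfold_le : (List.range i).foldl
      (fun sz j => if pvAGet a j ≤ pvAGet a i then max sz (pvDfsA a j) else sz) 0 ≤ (pos : Int) := by
    refine pv_foldl_max_le _ _ _ 0 _ (Int.natCast_nonneg pos) ?_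
    intro j hj hPj
    by_contra hcon
    rw [not_le] at hcon
    obtain ⟨hlt, hle⟩ := hmin j (List.mem_range.mp hj) pos hcon
    exact hp_hi hlt (le_trans hle hPj)
  have hfold_ge : (pos : Int) ≤ (List.range i).foldl
      (fun sz j => if pvAGet a j ≤ pvAGet a i then max sz (pvDfsA a j) else sz) 0 := by
    rcases Nat.eq_zero_or_pos pos with h0 | h0
    · rw [h0]
      exact_mod_cast pv_foldl_max_ge_init (List.range i) _ _ 0
    · have hplen : pos - 1 < t.length := by omega
      obtain ⟨j, hji, hdfsj, haj⟩ := hach (pos - 1) hplen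
      have hjx : pvAGet a j ≤ pvAGet a i := by
        rw [haj]; exact hp_lo (pos - 1) (by omega)
      have hmem := pv_foldl_max_ge_mem (List.range i)
        (fun j => pvAGet a j ≤ pvAGet a i) (fun j => pvDfsA a j) 0 j
        (List.mem_range.mpr hji) hjx
      beta_reduce at hmem
      rw [hdfsj] at hmem
      omega
  have hd : pvDfsA a i = (pos : Int) + 1 := by
    rw [pvDfsA_eq]; omega
  refine ⟨hd, ?_⟩
  by_cases hpe : pos = t.length
  · rw [if_pos hpe]
    have hga : ∀ k, k < t.length → (t ++ [pvAGet a i]).getD k 0 = t.getD k 0 := by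
      intro k hk
      simp [List.getD_eq_getElem?_getD, List.getElem?_append_left hk]
    have hgb : (t ++ [pvAGet a i]).getD t.length 0 = pvAGet a i := by
      simp [List.getD_eq_getElem?_getD]
    have hlen : (t ++ [pvAGet a i]).length = t.length + 1 := by simp
    refine ⟨?_, ?_, ?_⟩
    · intro k1 k2 hk12 hk2
      rw [hlen] at hk2
      by_cases hk2' : k2 < t.length
      · rw [hga k1 (by omega), hga k2 hk2']
        exact hm k1 k2 hk12 hk2'
      · have hk2e : k2 = t.length := by omega
        subst hk2e
        rw [hgb]
        by_cases hk1 : k1 < t.length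
        · rw [hga k1 hk1]
          exact hp_lo k1 (by omega)
        · have hk1e : k1 = t.length := by omega
          subst hk1e
          rw [hgb]
    · intro j hj k hk
      by_cases hji : j < i
      · obtain ⟨h1, h2⟩ := hmin j hji k hk
        refine ⟨by rw [hlen]; omega, ?_⟩
        rw [hga k h1]; exact h2
      · have hje : j = i := by omega
        subst hje
        rw [hd] at hk
        have hk' : k ≤ pos := by omega
        refine ⟨by rw [hlen]; omega, ?_⟩
        by_cases hkp : k < pos
        · rw [hga k (by omega)]
          exact hp_lo k hkp
        · have hke : k = t.length := by omega
          subst hke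
          rw [hgb]
    · intro k hk
      rw [hlen] at hk
      by_cases hk' : k < t.length
      · obtain ⟨j, h1, h2, h3⟩ := hach k hk'
        exact ⟨j, by omega, h2, by rw [hga k hk']; exact h3⟩
      · have hke : k = t.length := by omega
        refine ⟨i, by omega, ?_, ?_⟩
        · rw [hd]; omega
        · subst hke; rw [hgb]
  · rw [if_neg hpe]
    have hplen : pos < t.length := by omega
    have hxlt : ¬ t.getD pos 0 ≤ pvAGet a i := hp_hi hplen
    have hga : ∀ k, k ≠ pos → (t.set pos (pvAGet a i)).getD k 0 = t.getD k 0 := by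
      intro k hk
      simp [List.getD_eq_getElem?_getD, List.getElem?_set_ne (Ne.symm hk)]
    have hgb : (t.set pos (pvAGet a i)).getD pos 0 = pvAGet a i := by
      simp [List.getD_eq_getElem?_getD, hplen]
    have hlen : (t.set pos (pvAGet a i)).length = t.length := by simp
    refine ⟨?_, ?_, ?_⟩
    · intro k1 k2 hk12 hk2
      rw [hlen] at hk2
      by_cases h1p : k1 = pos <;> by_cases h2p : k2 = pos
      · subst h1p; subst h2p; exact le_refl _
      · subst h1p
        rw [hgb, hga k2 h2p]
        exact le_trans (le_of_lt (not_le.mp hxlt)) (hm pos k2 (by omega) hk2)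
      · subst h2p
        rw [hgb, hga k1 h1p]
        exact hp_lo k1 (by omega)
      · rw [hga k1 h1p, hga k2 h2p]
        exact hm k1 k2 hk12 hk2
    · intro j hj k hk
      by_cases hji : j < i
      · obtain ⟨h1, h2⟩ := hmin j hji k hk
        refine ⟨by rw [hlen]; omega, ?_⟩
        by_cases hkp : k = pos
        · subst hkp; rw [hgb]
          exact le_trans (le_of_lt (not_le.mp hxlt)) h2
        · rw [hga k hkp]; exact h2
      · have hje : j = i := by omega
        subst hje
        rw [hd] at hk
        refine ⟨by rw [hlen]; omega, ?_⟩
        by_cases hkp : k = pos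
        · subst hkp; rw [hgb]
        · rw [hga k hkp]
          exact hp_lo k (by omega)
    · intro k hk
      rw [hlen] at hk
      by_cases hkp : k = pos
      · subst hkp
        exact ⟨i, by omega, hd, by rw [hgb]⟩
      · obtain ⟨j, h1, h2, h3⟩ := hach k hk
        exact ⟨j, by omega, h2, by rw [hga k hkp]; exact h3⟩

lemma pv_fold (a : List Int) : ∀ i, i ≤ a.length →
    ∃ t, (a.take i).foldl pvStep ([], []) =
      (t, (List.range i).map (fun j => pvDfsA a j)) ∧ pvInv a i t := by
  intro i
  induction i with
  | zero =>
    intro _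
    refine ⟨[], by simp, ?_, ?_, ?_⟩
    · intro k1 k2 _ hk; simp at hk
    · intro j hj; omega
    · intro k hk; simp at hk
  | succ i ih =>
    intro h1
    obtain ⟨t, hf, hinv⟩ := ih (by omega)
    have hi : i < a.length := by omega
    have htake : a.take (i + 1) = a.take i ++ [a.getD i 0] := by
      rw [List.take_add_one]
      simp [List.getElem?_eq_getElem hi, List.getD_eq_getElem?_getD]
    rw [htake, List.foldl_append, hf]
    obtain ⟨hd, hinv'⟩ := pv_main a i t hinv
    refine ⟨_, ?_, hinv'⟩
    have hx : a.getD i 0 = pvAGet a i := rfl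
    rw [hx]
    rw [List.range_succ, List.map_append, List.map_cons, List.map_nil, hd]
    rfl

-- ===== VERDICT (by name: the statement is the Claim_ definition above) =====
theorem longestObstacleCourseAtEachPosition1_spec : Claim_equal_longestObstacleCourseAtEachPosition1 := by
  intro a _
  obtain ⟨t, hfold, -⟩ := pv_fold a a.length le_rfl
  unfold Spec_longestObstacleCourseAtEachPosition1
  rw [List.take_length] at hfold
  unfold longestObstacleCourseAtEachPosition1 longestObstacleCourseAtEachPosition1_alt
  rw [hfold]
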